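-- pv_equiv track=rewrite | github.com/wzlzju/drawsim | fehSimulation_special.py | gachaStrategy
-- ===== SOURCE A (Python) =====
-- target = ["r", "w", "g", "b"]
--
-- def gachaStrategy(colors):
-- 	res = []
-- 	if target[0] in colors:
-- 		for i in range(5):
-- 			if colors[i] == target[0]:
-- 				res.append(i)
-- 	else:
-- 		for c in target[1:]:
-- 			if c in colors:
-- 				for i in range(5):
-- 					if colors[i] == c:
-- 						res.append(i)
-- 						break
-- 				break
-- 	return res
-- ===== SOURCE B (Python) =====
-- target = ["r", "w", "g", "b"]
--
-- def gachaStrategy(colors):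
--     # rank every color by priority in one min-pass, then one scan of the first five slots
--     rank = {c: k for k, c in enumerate(target)}
--     best = min((rank.get(c, len(target)) for c in colors), default=len(target))
--     if best == len(target):
--         return []
--     hits = [i for i, c in enumerate(colors[:5]) if c == target[best]]
--     return hits if best == 0 else hits[:1]
-- ===== Notes on version B (the rewrite author's own statement) =====
-- stated objective: alternative
-- what changed: A loops over the priority colors, testing membership and rescanning the first five slots per color with nested loops and breaks; B instead computes in one pass the minimum priority rank present anywhere in colors, then does a single scan of the first five slots for that one winning color (all its positions for rank 0, the first position otherwise).
-- crash fix: When 'r' occurs in colors but len(colors) < 5, A raises IndexError (colors[i] for i in range(5)); B returns the list of positions of 'r' among the first five slots. — e.g. on gachaStrategy(["r"]): A raises IndexError, B returns [0]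
import Mathlib
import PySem

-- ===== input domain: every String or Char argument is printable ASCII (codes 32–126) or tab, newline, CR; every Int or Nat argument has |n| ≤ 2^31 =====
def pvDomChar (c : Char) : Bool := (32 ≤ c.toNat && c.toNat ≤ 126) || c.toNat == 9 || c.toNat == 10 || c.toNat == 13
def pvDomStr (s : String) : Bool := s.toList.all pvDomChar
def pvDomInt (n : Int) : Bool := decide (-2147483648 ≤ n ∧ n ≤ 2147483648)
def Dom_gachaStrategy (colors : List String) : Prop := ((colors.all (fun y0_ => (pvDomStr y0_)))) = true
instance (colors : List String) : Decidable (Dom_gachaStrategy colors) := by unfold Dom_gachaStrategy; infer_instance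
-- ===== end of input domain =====

-- B replaces A's priority-ordered membership tests with per-color rescans by a single
-- min-of-rank pass over the whole list followed by one scan of the first five slots
-- (objective: alternative).

-- ===== PORT A =====
-- inner 'for i in range(5): if colors[i] == c: res.append(i); break' (res starts empty)
def pvInnerGo (colors : List String) (c : String) : List Int → List Int
  | [] => []
  | i :: rest =>
    match PySem.List.pyGet? colors i with
    | some x => if x = c then [i] else pvInnerGo colors c rest
    | none => []   -- IndexError in Python (unreachable when c ∈ colors; excluded by Pre_)

def pvInner (colors : List String) (c : String) : List Int :=
  pvInnerGo colors c (PySem.List.pyRange 0 5 1)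

-- 'for c in target[1:]: if c in colors: <inner>; break'
def pvOuter (colors : List String) : List String → List Int
  | [] => []
  | c :: rest => if c ∈ colors then pvInner colors c else pvOuter colors rest

def gachaStrategy (colors : List String) : List Int :=
  if "r" ∈ colors then
    (PySem.List.pyRange 0 5 1).foldl (fun res i =>
      match PySem.List.pyGet? colors i with
      | some x => if x = "r" then res ++ [i] else res
      | none => res) []   -- IndexError in Python; excluded by Pre_
  else pvOuter colors ["w", "g", "b"]

-- ===== PORT B =====
-- 'rank = {c: k for k, c in enumerate(target)}'
def pvRank : PySem.Dict String Int :=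
  (PySem.List.enumerate ["r", "w", "g", "b"] 0).foldl (fun d p => d.insert p.2 p.1) PySem.Dict.empty

-- 'best = min((rank.get(c, len(target)) for c in colors), default=len(target))'
def pvBest (colors : List String) : Int :=
  match colors.map (fun c => pvRank.getD c 4) with
  | [] => 4
  | x :: xs => xs.foldl min x

def gachaStrategy_alt (colors : List String) : List Int :=
  let best := pvBest colors
  if best = 4 then []
  else
    -- 'hits = [i for i, c in enumerate(colors[:5]) if c == target[best]]'
    let hits := ((PySem.List.enumerate (PySem.List.slice colors none (some 5)) 0).filter
        (fun p => p.2 == PySem.List.pyGetD ["r", "w", "g", "b"] best "")).map (·.1)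
    if best = 0 then hits else PySem.List.slice hits none (some 1)

-- ===== PRECONDITION & SPEC =====
-- Pre_ excludes exactly the inputs where A raises IndexError: "r" present but fewer than 5 slots.
def Pre_gachaStrategy (colors : List String) : Prop := "r" ∈ colors → 5 ≤ colors.length
instance (colors : List String) : Decidable (Pre_gachaStrategy colors) := by
  unfold Pre_gachaStrategy; infer_instance
def pvWitness_gachaStrategy : List String := ["r", "w", "g", "b", "r"]

-- When "r" occurs in colors but there are fewer than 5 slots, A raises IndexError; B returns the positions of "r".
def Raises_gachaStrategy (colors : List String) : Prop := "r" ∈ colors ∧ colors.length < 5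
instance (colors : List String) : Decidable (Raises_gachaStrategy colors) := by
  unfold Raises_gachaStrategy; infer_instance
def pvRaiseWitness_gachaStrategy : List String := ["r"]
def pvRaiseWitnessOut_gachaStrategy : List Int := [0]

def Spec_gachaStrategy (colors : List String) (out : List Int) : Prop := out = gachaStrategy_alt colors
instance (colors : List String) (out : List Int) : Decidable (Spec_gachaStrategy colors out) := by
  unfold Spec_gachaStrategy; infer_instance

-- ===== CLAIM (what is proved, stated in full; the proofs are below) =====
def Claim_equal_gachaStrategy : Prop := ∀ (colors : List String), Dom_gachaStrategy colors → Pre_gachaStrategy colors → Spec_gachaStrategy colors (gachaStrategy colors)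
def Claim_raises_gachaStrategy : Prop := (∀ (colors : List String), Dom_gachaStrategy colors → Raises_gachaStrategy colors → ¬ Pre_gachaStrategy colors) ∧ (Dom_gachaStrategy (pvRaiseWitness_gachaStrategy) ∧ Raises_gachaStrategy (pvRaiseWitness_gachaStrategy) ∧ gachaStrategy_alt (pvRaiseWitness_gachaStrategy) = pvRaiseWitnessOut_gachaStrategy)

-- ===== LEMMAS AND PROOFS =====

-- the rank lookup in closed form
theorem pvRankOf (c : String) :
    pvRank.getD c 4 = if "r" = c then 0 else if "w" = c then 1 else
      if "g" = c then 2 else if "b" = c then 3 else 4 := by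
  have h : pvRank = PySem.Dict.mk [("r", (0:Int)), ("w", 1), ("g", 2), ("b", 3)] := by rfl
  rw [h]
  simp only [PySem.Dict.getD, PySem.Dict.get?_mk_cons, beq_iff_eq]
  split_ifs <;> rfl

theorem pvFoldlMinInit (xs : List Int) (x : Int) : xs.foldl min x ≤ x := by
  induction xs generalizing x with
  | nil => simp
  | cons y ys ih => exact le_trans (ih (min x y)) (min_le_left x y)

theorem pvFoldlMinLe {xs : List Int} {x a : Int} (h : a ∈ x :: xs) : xs.foldl min x ≤ a := by
  induction xs generalizing x with
  | nil => simp_all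
  | cons y ys ih =>
    simp only [List.mem_cons] at h
    rcases h with h | h | h
    · subst h
      exact le_trans (pvFoldlMinInit ys (min a y)) (min_le_left a y)
    · subst h
      exact le_trans (pvFoldlMinInit ys (min x a)) (min_le_right x a)
    · exact ih (List.mem_cons.mpr (Or.inr h)) (x := min x y)

theorem pvLeFoldlMin {xs : List Int} {x c : Int} (h : ∀ a ∈ x :: xs, c ≤ a) :
    c ≤ xs.foldl min x := by
  induction xs generalizing x with
  | nil => exact h x (by simp)
  | cons y ys ih =>
    refine ih (fun a ha => ?_)
    simp only [List.mem_cons] at ha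
    rcases ha with ha | ha
    · subst ha
      exact le_min (h x (by simp)) (h y (by simp))
    · exact h a (by simp [ha])

-- pvBest equals k when some color has rank k and no color has a smaller rank
theorem pvBestEq (colors : List String) (k : Int)
    (hmem : ∃ c ∈ colors, pvRank.getD c 4 = k)
    (hlb : ∀ c ∈ colors, k ≤ pvRank.getD c 4) : pvBest colors = k := by
  obtain ⟨c0, hc0, hk⟩ := hmem
  rcases colors with _ | ⟨x, xs⟩
  · simp at hc0
  · unfold pvBest
    simp only [List.map_cons]
    refine le_antisymm ?_ ?_
    · refine pvFoldlMinLe ?_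
      rw [← hk]
      rcases List.mem_cons.mp hc0 with h | h
      · subst h; exact List.mem_cons_self
      · exact List.mem_cons_of_mem _ (List.mem_map_of_mem h)
    · refine pvLeFoldlMin (fun a ha => ?_)
      rcases List.mem_cons.mp ha with h | h
      · subst h; exact hlb x List.mem_cons_self
      · obtain ⟨c, hc, rfl⟩ := List.mem_map.mp h
        exact hlb c (List.mem_cons_of_mem _ hc)

theorem pvRange5 : PySem.List.pyRange 0 5 1 = [0, 1, 2, 3, 4] := by decide

theorem pvTake5 (colors : List String) :
    PySem.List.slice colors none (some 5) = colors.take 5 := by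
  have := PySem.List.slice_to_natCast (xs := colors) (b := 5)
  norm_num at this; exact this

theorem pvSlice1 (xs : List Int) : PySem.List.slice xs none (some 1) = xs.take 1 := by
  have := PySem.List.slice_to_natCast (xs := xs) (b := 1)
  norm_num at this; exact this

-- A's "r"-branch fold equals the index-filter over the first five slots (when they exist)
theorem pvCase1 (colors : List String) (h : 5 ≤ colors.length) :
    (PySem.List.pyRange 0 5 1).foldl (fun res i =>
      match PySem.List.pyGet? colors i with
      | some x => if x = "r" then res ++ [i] else res
      | none => res) [] =
      ((PySem.List.enumerate (colors.take 5) 0).filter (fun p => p.2 == "r")).map (·.1) := by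
  rcases colors with _ | ⟨x1, _ | ⟨x2, _ | ⟨x3, _ | ⟨x4, _ | ⟨x5, t⟩⟩⟩⟩⟩ <;>
    simp only [List.length_nil, List.length_cons] at h <;> try omega
  rw [pvRange5]
  simp only [List.foldl_cons, List.foldl_nil,
    show PySem.List.pyGet? (x1::x2::x3::x4::x5::t) 0 = some x1 from by
      simp [PySem.List.pyGet?, PySem.List.pyIdx?]; rw [if_pos (by omega)]; simp,
    show PySem.List.pyGet? (x1::x2::x3::x4::x5::t) 1 = some x2 from by
      simp [PySem.List.pyGet?, PySem.List.pyIdx?]; rw [if_pos (by omega)]; simp,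
    show PySem.List.pyGet? (x1::x2::x3::x4::x5::t) 2 = some x3 from by
      simp [PySem.List.pyGet?, PySem.List.pyIdx?]; rw [if_pos (by omega)]; simp,
    show PySem.List.pyGet? (x1::x2::x3::x4::x5::t) 3 = some x4 from by
      simp [PySem.List.pyGet?, PySem.List.pyIdx?]; rw [if_pos (by omega)]; simp,
    show PySem.List.pyGet? (x1::x2::x3::x4::x5::t) 4 = some x5 from by
      simp [PySem.List.pyGet?, PySem.List.pyIdx?]; rw [if_pos (by omega)]; simp]
  simp [PySem.List.enumerate_cons, PySem.List.enumerate_nil, List.filter_cons, List.filter_nil, beq_iff_eq]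
  split_ifs <;> simp_all

-- A's break-at-first-match inner loop equals take-1 of the index-filter
theorem pvCase2 (colors : List String) (c : String) :
    pvInner colors c =
      (((PySem.List.enumerate (colors.take 5) 0).filter (fun p => p.2 == c)).map (·.1)).take 1 := by
  rw [pvInner, pvRange5]
  rcases colors with _ | ⟨x1, _ | ⟨x2, _ | ⟨x3, _ | ⟨x4, _ | ⟨x5, t⟩⟩⟩⟩⟩
  · simp [pvInnerGo, PySem.List.pyGet?, PySem.List.pyIdx?,
      PySem.List.enumerate_nil, List.filter_nil]
  · simp [pvInnerGo, PySem.List.pyGet?, PySem.List.pyIdx?,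
      PySem.List.enumerate_cons, PySem.List.enumerate_nil, List.filter_cons, List.filter_nil, beq_iff_eq]
    split_ifs <;> simp_all
  · simp [pvInnerGo, PySem.List.pyGet?, PySem.List.pyIdx?,
      PySem.List.enumerate_cons, PySem.List.enumerate_nil, List.filter_cons, List.filter_nil, beq_iff_eq]
    split_ifs <;> simp_all
  · simp [pvInnerGo, PySem.List.pyGet?, PySem.List.pyIdx?,
      PySem.List.enumerate_cons, PySem.List.enumerate_nil, List.filter_cons, List.filter_nil, beq_iff_eq]
    split_ifs <;> simp_all
  · simp [pvInnerGo, PySem.List.pyGet?, PySem.List.pyIdx?,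
      PySem.List.enumerate_cons, PySem.List.enumerate_nil, List.filter_cons, List.filter_nil, beq_iff_eq]
    split_ifs <;> simp_all
  · simp only [pvInnerGo,
      show PySem.List.pyGet? (x1::x2::x3::x4::x5::t) 0 = some x1 from by
        simp [PySem.List.pyGet?, PySem.List.pyIdx?]; rw [if_pos (by omega)]; simp,
      show PySem.List.pyGet? (x1::x2::x3::x4::x5::t) 1 = some x2 from by
        simp [PySem.List.pyGet?, PySem.List.pyIdx?]; rw [if_pos (by omega)]; simp,
      show PySem.List.pyGet? (x1::x2::x3::x4::x5::t) 2 = some x3 from by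
        simp [PySem.List.pyGet?, PySem.List.pyIdx?]; rw [if_pos (by omega)]; simp,
      show PySem.List.pyGet? (x1::x2::x3::x4::x5::t) 3 = some x4 from by
        simp [PySem.List.pyGet?, PySem.List.pyIdx?]; rw [if_pos (by omega)]; simp,
      show PySem.List.pyGet? (x1::x2::x3::x4::x5::t) 4 = some x5 from by
        simp [PySem.List.pyGet?, PySem.List.pyIdx?]; rw [if_pos (by omega)]; simp]
    simp [PySem.List.enumerate_cons, PySem.List.enumerate_nil, List.filter_cons, List.filter_nil, beq_iff_eq]
    split_ifs <;> simp_all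

-- ===== VERDICT (by name: the statement is the Claim_ definition above) =====
theorem gachaStrategy_spec : Claim_equal_gachaStrategy := by
  intro colors _ hpre
  unfold Spec_gachaStrategy gachaStrategy gachaStrategy_alt
  by_cases hr : "r" ∈ colors
  · have hb : pvBest colors = 0 := by
      refine pvBestEq colors 0 ⟨"r", hr, by rw [pvRankOf]; simp⟩ (fun c _ => ?_)
      rw [pvRankOf]; split_ifs <;> omega
    simp only [hr, if_true, hb, pvTake5]
    norm_num
    exact pvCase1 colors (hpre hr)
  · simp only [hr, if_false, pvOuter]
    by_cases hw : "w" ∈ colors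
    · have hb : pvBest colors = 1 := by
        refine pvBestEq colors 1 ⟨"w", hw, by rw [pvRankOf]; simp_all⟩ (fun c hc => ?_)
        rw [pvRankOf]; split_ifs with h <;> first | (subst h; exact absurd hc hr) | omega
      simp only [hw, if_true, hb, pvTake5, pvSlice1]
      norm_num [pvCase2, show PySem.List.pyGetD ["r", "w", "g", "b"] (1:Int) "" = "w" from by decide]
    · by_cases hg : "g" ∈ colors
      · have hb : pvBest colors = 2 := by
          refine pvBestEq colors 2 ⟨"g", hg, by rw [pvRankOf]; simp_all⟩ (fun c hc => ?_)
          rw [pvRankOf]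
          split_ifs with h1 h2 <;>
            first | (subst h1; exact absurd hc hr) | (subst h2; exact absurd hc hw) | omega
        simp only [hw, if_false, hg, if_true, hb, pvTake5, pvSlice1]
        norm_num [pvCase2, show PySem.List.pyGetD ["r", "w", "g", "b"] (2:Int) "" = "g" from by decide]
      · by_cases hbl : "b" ∈ colors
        · have hb : pvBest colors = 3 := by
            refine pvBestEq colors 3 ⟨"b", hbl, by rw [pvRankOf]; simp_all⟩ (fun c hc => ?_)
            rw [pvRankOf]
            split_ifs with h1 h2 h3 <;>
              first | (subst h1; exact absurd hc hr) | (subst h2; exact absurd hc hw) |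
                (subst h3; exact absurd hc hg) | omega
          simp only [hw, if_false, hg, if_false, hbl, if_true, hb, pvTake5, pvSlice1]
          norm_num [pvCase2, show PySem.List.pyGetD ["r", "w", "g", "b"] (3:Int) "" = "b" from by decide]
        · have hb : pvBest colors = 4 := by
            rcases colors with _ | ⟨x, xs⟩
            · rfl
            · refine pvBestEq (x :: xs) 4 ⟨x, List.mem_cons_self, ?_⟩ (fun c hc => ?_)
              · rw [pvRankOf]
                split_ifs with h1 h2 h3 h4 <;> simp_all
              · rw [pvRankOf]
                split_ifs with h1 h2 h3 h4 <;> simp_all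
          simp only [hw, if_false, hg, if_false, hbl, if_false, hb, if_true]

@[simp] theorem gachaStrategy_raises : Claim_raises_gachaStrategy := by
  unfold Claim_raises_gachaStrategy
  constructor
  · intro colors _ ⟨h1, h2⟩ hpre
    exact absurd (hpre h1) (by omega)
  · exact ⟨by decide, by decide, by decide⟩
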